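-- pv_equiv track=rewrite | github.com/heybake/ev-navigator-deuces | dw_strategy_definitions.py | holds_straight_flush
-- ===== SOURCE A (Python) =====
-- def holds_straight_flush(ranks, suits, hand):
--     if len(set(suits)) != 1: return None
--     non_2 = sorted([r for r in ranks if r != 2])
--     if not non_2: return hand
--     span = non_2[-1] - non_2[0]
--     # Check Ace Low Wheel A-2-3-4-5
--     check_ranks = list(non_2)
--     if 14 in check_ranks:
--         check_ranks_low = [1 if r==14 else r for r in check_ranks]
--         check_ranks_low.sort()
--         span_low = check_ranks_low[-1] - check_ranks_low[0]
--         if span_low <= 4 and len(set(check_ranks_low)) == len(check_ranks_low): return hand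
--
--     if span <= 4 and len(set(non_2)) == len(non_2): return hand
--     return None
-- ===== SOURCE B (Python) =====
-- def _sf_run(vs):
--     if not vs:
--         return True
--     x, rest = vs[0], vs[1:]
--     return all(x != y and abs(x - y) <= 4 for y in rest) and _sf_run(rest)
--
-- def holds_straight_flush(ranks, suits, hand):
--     if not suits or any(s != suits[0] for s in suits[1:]):
--         return None
--     non_2 = [r for r in ranks if r != 2]
--     if not non_2:
--         return hand
--     if _sf_run(non_2) or _sf_run([1 if r == 14 else r for r in non_2]):
--         return hand
--     return None
-- ===== Notes on version B (the rewrite author's own statement) =====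
-- stated objective: alternative
-- what changed: Replaces A's sort/set machinery (sorted list endpoints for the span, set size for distinctness, plus a separate ace-low branch) with a recursive brute-force all-pairs check: every pair of non-2 ranks must be distinct and at most 4 apart, tried under each of the two rank readings; the flush test compares each suit to the first instead of building a set.
import Mathlib
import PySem

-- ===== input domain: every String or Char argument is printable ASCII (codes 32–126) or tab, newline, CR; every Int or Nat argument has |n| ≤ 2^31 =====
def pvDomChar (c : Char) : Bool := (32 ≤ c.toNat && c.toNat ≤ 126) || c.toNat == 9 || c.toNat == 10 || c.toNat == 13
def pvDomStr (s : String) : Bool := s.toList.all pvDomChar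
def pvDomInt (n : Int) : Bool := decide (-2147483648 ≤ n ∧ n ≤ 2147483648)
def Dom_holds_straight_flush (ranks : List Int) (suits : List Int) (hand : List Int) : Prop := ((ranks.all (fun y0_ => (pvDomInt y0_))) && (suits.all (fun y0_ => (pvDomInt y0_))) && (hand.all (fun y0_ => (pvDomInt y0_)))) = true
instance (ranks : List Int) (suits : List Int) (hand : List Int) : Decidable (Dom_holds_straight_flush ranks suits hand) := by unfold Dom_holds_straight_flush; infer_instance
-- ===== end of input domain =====

-- B drops A's sorting, set-building and span arithmetic entirely: it brute-force compares every
-- pair of rank values (distinct and at most 4 apart) under each of the two rank readings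
-- (objective: alternative — an all-pairs check instead of sort/set aggregates).

-- ===== PORT A =====
def holds_straight_flush (ranks : List Int) (suits : List Int) (hand : List Int) : Option (List Int) :=
  if (PySem.Set.ofList suits).length ≠ 1 then none else
  let non_2 := PySem.List.sorted (ranks.filter (fun r => decide (r ≠ 2))) (fun x => x) false
  if non_2 = [] then some hand else
  -- non_2 is nonempty here, so the Python indexing cannot raise; getD 0 is never the value used
  let span := (PySem.List.pyGet? non_2 (-1)).getD 0 - (PySem.List.pyGet? non_2 0).getD 0
  let check_ranks := non_2
  if 14 ∈ check_ranks then
    let check_ranks_low := PySem.List.sorted (check_ranks.map (fun r => if r = 14 then (1:Int) else r)) (fun x => x) false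
    let span_low := (PySem.List.pyGet? check_ranks_low (-1)).getD 0 - (PySem.List.pyGet? check_ranks_low 0).getD 0
    if span_low ≤ 4 ∧ (PySem.Set.ofList check_ranks_low).length = check_ranks_low.length then some hand
    else if span ≤ 4 ∧ (PySem.Set.ofList non_2).length = non_2.length then some hand
    else none
  else
    if span ≤ 4 ∧ (PySem.Set.ofList non_2).length = non_2.length then some hand
    else none

-- ===== PORT B =====
-- Source B's recursive helper _sf_run: head compared against every later element, then recurse on the tail
def sfRun : List Int → Bool
  | [] => true
  | x :: rest => rest.all (fun y => decide (x ≠ y) && decide (|x - y| ≤ 4)) && sfRun rest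

def holds_straight_flush_alt (ranks : List Int) (suits : List Int) (hand : List Int) : Option (List Int) :=
  match suits with
  | [] => none
  | s0 :: rest =>
    if rest.any (fun s => decide (s ≠ s0)) then none else
    let non_2 := ranks.filter (fun r => decide (r ≠ 2))
    if non_2 = [] then some hand else
    if sfRun non_2 || sfRun (non_2.map (fun r => if r = 14 then (1:Int) else r)) then some hand
    else none

-- ===== PRECONDITION & SPEC =====
def Spec_holds_straight_flush (ranks : List Int) (suits : List Int) (hand : List Int) (out : Option (List Int)) : Prop := out = holds_straight_flush_alt ranks suits hand
instance (ranks : List Int) (suits : List Int) (hand : List Int) (out : Option (List Int)) : Decidable (Spec_holds_straight_flush ranks suits hand out) := by unfold Spec_holds_straight_flush; infer_instance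

-- ===== CLAIM (what is proved, stated in full; the proofs are below) =====
def Claim_equal_holds_straight_flush : Prop := ∀ (ranks : List Int) (suits : List Int) (hand : List Int), Dom_holds_straight_flush ranks suits hand → Spec_holds_straight_flush ranks suits hand (holds_straight_flush ranks suits hand)

-- ===== LEMMAS AND PROOFS =====

theorem ofList_length_eq_card (xs : List Int) :
    (PySem.Set.ofList xs).length = xs.toFinset.card := by
  have hn : (PySem.Set.ofList xs : List Int).Nodup := PySem.Set.nodup_ofList xs
  have he : (PySem.Set.ofList xs : List Int).toFinset = xs.toFinset := by
    ext a; simp [List.mem_toFinset, PySem.Set.mem_ofList]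
  rw [← he, List.toFinset_card_of_nodup hn]

-- set length = list length ⟺ no duplicates
theorem ofList_length_eq_length_iff (xs : List Int) :
    (PySem.Set.ofList xs).length = xs.length ↔ xs.Nodup := by
  rw [ofList_length_eq_card, List.card_toFinset]
  constructor
  · intro h
    have hsub : xs.dedup.Sublist xs := List.dedup_sublist xs
    have := hsub.eq_of_length h
    rw [← this]; exact List.nodup_dedup xs
  · intro h; rw [List.dedup_eq_self.2 h]

-- the flush test: set of suits has one element ⟺ suits nonempty and all equal to the first
theorem suits_one_iff (s0 : Int) (rest : List Int) :
    (PySem.Set.ofList (s0 :: rest)).length = 1 ↔ ∀ s ∈ rest, s = s0 := by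
  rw [ofList_length_eq_card, Finset.card_eq_one]
  constructor
  · rintro ⟨a, ha⟩ s hs
    have h0 : s0 ∈ (s0 :: rest).toFinset := by simp
    have h1 : s ∈ (s0 :: rest).toFinset := by simp [hs]
    rw [ha] at h0 h1
    simp at h0 h1; rw [h0, h1]
  · intro h
    refine ⟨s0, ?_⟩
    ext a
    simp only [List.mem_toFinset, List.mem_cons, Finset.mem_singleton]
    constructor
    · rintro (rfl | ha)
      · rfl
      · exact h a ha
    · rintro rfl
      exact Or.inl rfl

theorem sfRun_iff_pairwise (v : List Int) :
    sfRun v = true ↔ v.Pairwise (fun a b => a ≠ b ∧ |a - b| ≤ 4) := by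
  induction v with
  | nil => simp [sfRun]
  | cons x rest ih =>
    simp [sfRun, List.pairwise_cons, ih, List.all_eq_true, and_comm]

theorem sf_rel_symm : Symmetric (fun a b : Int => a ≠ b ∧ |a - b| ≤ 4) := by
  intro a b ⟨h1, h2⟩
  exact ⟨h1.symm, by rwa [abs_sub_comm]⟩

theorem sfRun_perm {xs ys : List Int} (h : xs.Perm ys) : sfRun xs = sfRun ys := by
  have hiff : xs.Pairwise (fun a b => a ≠ b ∧ |a - b| ≤ 4) ↔
      ys.Pairwise (fun a b => a ≠ b ∧ |a - b| ≤ 4) := h.pairwise_iff (fun hab => sf_rel_symm hab)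
  by_cases hx : sfRun xs = true
  · rw [hx]
    exact ((sfRun_iff_pairwise ys).2 (hiff.1 ((sfRun_iff_pairwise xs).1 hx))).symm
  · have hy : sfRun ys ≠ true := fun hy =>
      hx ((sfRun_iff_pairwise xs).2 (hiff.2 ((sfRun_iff_pairwise ys).1 hy)))
    simp only [ne_eq, Bool.not_eq_true] at hx hy
    rw [hx, hy]

-- the all-pairs check equals "no duplicates and max − min ≤ 4"
theorem sfRun_iff_span (v : List Int) (hv : v ≠ []) :
    sfRun v = true ↔ v.Nodup ∧
      (PySem.List.max? (PySem.Set.ofList v) (fun x => x)).getD 0 -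
        (PySem.List.min? (PySem.Set.ofList v) (fun x => x)).getD 0 ≤ 4 := by
  have hne : PySem.Set.ofList v ≠ [] := by
    cases v with
    | nil => exact absurd rfl hv
    | cons a t =>
      intro hx
      have := (PySem.Set.mem_ofList ..).2 (show a ∈ a :: t by simp)
      simp [hx] at this
  obtain ⟨m, hM⟩ : ∃ m, PySem.List.max? (PySem.Set.ofList v) (fun x => x) = some m := by
    cases h : PySem.List.max? (PySem.Set.ofList v) (fun x => x) with
    | none => exact absurd ((PySem.List.max?_eq_none_iff _ _).1 h) hne
    | some m => exact ⟨m, rfl⟩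
  obtain ⟨n, hN⟩ : ∃ n, PySem.List.min? (PySem.Set.ofList v) (fun x => x) = some n := by
    cases h : PySem.List.min? (PySem.Set.ofList v) (fun x => x) with
    | none => exact absurd ((PySem.List.min?_eq_none_iff _ _).1 h) hne
    | some n => exact ⟨n, rfl⟩
  have hmv : m ∈ v := (PySem.Set.mem_ofList ..).1 (PySem.List.max?_mem hM)
  have hnv : n ∈ v := (PySem.Set.mem_ofList ..).1 (PySem.List.min?_mem hN)
  have hmax : ∀ y ∈ v, y ≤ m := fun y hy =>
    PySem.List.max?_isMax hM y ((PySem.Set.mem_ofList ..).2 hy)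
  have hmin : ∀ y ∈ v, n ≤ y := fun y hy =>
    PySem.List.min?_isMin hN y ((PySem.Set.mem_ofList ..).2 hy)
  rw [sfRun_iff_pairwise, hM, hN]
  simp only [Option.getD_some]
  constructor
  · intro hp
    have hforall := hp.forall sf_rel_symm
    constructor
    · exact hp.imp (fun h => h.1)
    · rcases eq_or_ne m n with rfl | hmn
      · omega
      · have := (hforall hmv hnv (by intro h; exact hmn h)).2
        have h1 : n ≤ m := hmin m hmv
        rw [abs_sub_le_iff] at this
        omega
  · rintro ⟨hnd, hspan⟩
    have : ∀ a ∈ v, ∀ b ∈ v, |a - b| ≤ 4 := by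
      intro a ha b hb
      have := hmax a ha; have := hmin a ha
      have := hmax b hb; have := hmin b hb
      rw [abs_sub_le_iff]; omega
    have hp4 : v.Pairwise (fun a b => |a - b| ≤ 4) :=
      List.pairwise_of_forall_mem_list this
    exact List.pairwise_and_iff.2 ⟨hnd, hp4⟩

theorem pairwise_le_getLast {l : List Int} (hp : l.Pairwise (· ≤ ·)) (h : l ≠ []) :
    ∀ y ∈ l, y ≤ l.getLast h := by
  induction l with
  | nil => simp at h
  | cons a t ih =>
    intro y hy
    cases t with
    | nil => simp at hy; simp [hy]
    | cons b u =>
      rw [List.getLast_cons (by simp)]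
      rcases List.mem_cons.1 hy with rfl | hyt
      · exact le_trans (List.rel_of_pairwise_cons hp (List.getLast_mem _)) (le_refl _)
      · exact ih hp.of_cons (by simp) y hyt

theorem sorted_last_eq (xs : List Int) (h : xs ≠ []) :
    (PySem.List.pyGet? (PySem.List.sorted xs (fun x => x) false) (-1)).getD 0 =
      (PySem.List.max? (PySem.Set.ofList xs) (fun x => x)).getD 0 := by
  have hs : PySem.List.sorted xs (fun x => x) false ≠ [] := by
    simp [PySem.List.sorted_eq_nil_iff, h]
  set s := PySem.List.sorted xs (fun x => x) false with hsdef
  have hL : PySem.List.pyGet? s (-1) = some (s.getLast hs) := by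
    rw [PySem.List.pyGet?_neg_one, List.getLast?_eq_some_getLast hs]
  have hpw : s.Pairwise (fun a b => a ≤ b) := PySem.List.sorted_pairwise xs (fun x => x)
  have hmax : ∀ y ∈ xs, y ≤ s.getLast hs := by
    intro y hy
    exact pairwise_le_getLast hpw hs y ((PySem.List.mem_sorted _ _ _ _).2 hy)
  have hLmem : s.getLast hs ∈ xs := (PySem.List.mem_sorted _ _ _ _).1 (List.getLast_mem hs)
  have hne : PySem.Set.ofList xs ≠ [] := by
    intro hx
    have := (PySem.Set.mem_ofList ..).2 hLmem
    simp [hx] at this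
  cases hM : PySem.List.max? (PySem.Set.ofList xs) (fun x => x) with
  | none => exact absurd ((PySem.List.max?_eq_none_iff _ _).1 hM) hne
  | some m =>
    have hm1 : m ∈ xs := (PySem.Set.mem_ofList ..).1 (PySem.List.max?_mem hM)
    have h1 : m ≤ s.getLast hs := hmax m hm1
    have h2 : s.getLast hs ≤ m :=
      PySem.List.max?_isMax hM _ ((PySem.Set.mem_ofList ..).2 hLmem)
    rw [hL]
    simp [le_antisymm h1 h2]

theorem sorted_head_eq (xs : List Int) (h : xs ≠ []) :
    (PySem.List.pyGet? (PySem.List.sorted xs (fun x => x) false) 0).getD 0 =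
      (PySem.List.min? (PySem.Set.ofList xs) (fun x => x)).getD 0 := by
  have hs : PySem.List.sorted xs (fun x => x) false ≠ [] := by
    simp [PySem.List.sorted_eq_nil_iff, h]
  cases hsc : PySem.List.sorted xs (fun x => x) false with
  | nil => exact absurd hsc hs
  | cons a t =>
    have hmin : ∀ y ∈ xs, a ≤ y := PySem.List.key_head_sorted_le xs (fun x => x) hsc
    have hamem : a ∈ xs := by
      have : a ∈ PySem.List.sorted xs (fun x => x) false := by rw [hsc]; simp
      exact (PySem.List.mem_sorted _ _ _ _).1 this
    have hne : PySem.Set.ofList xs ≠ [] := by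
      intro hx
      have := (PySem.Set.mem_ofList ..).2 hamem
      simp [hx] at this
    cases hM : PySem.List.min? (PySem.Set.ofList xs) (fun x => x) with
    | none => exact absurd ((PySem.List.min?_eq_none_iff _ _).1 hM) hne
    | some m =>
      have h1 : a ≤ m := hmin m ((PySem.Set.mem_ofList ..).1 (PySem.List.min?_mem hM))
      have h2 : m ≤ a := PySem.List.min?_isMin hM _ ((PySem.Set.mem_ofList ..).2 hamem)
      simp [le_antisymm h1 h2]

-- A's sorted-endpoints span + set-size test equals B's all-pairs check, on nonempty lists
theorem A_cond_iff (v : List Int) (hv : v ≠ []) :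
    (((PySem.List.pyGet? (PySem.List.sorted v (fun x => x) false) (-1)).getD 0 -
       (PySem.List.pyGet? (PySem.List.sorted v (fun x => x) false) 0).getD 0 ≤ 4) ∧
      (PySem.Set.ofList (PySem.List.sorted v (fun x => x) false)).length =
        (PySem.List.sorted v (fun x => x) false).length) ↔ sfRun v = true := by
  have hperm := PySem.List.sorted_perm v (fun x => x) false
  have hset : (PySem.Set.ofList (PySem.List.sorted v (fun x => x) false)).length =
      (PySem.Set.ofList v).length := by
    rw [ofList_length_eq_card, ofList_length_eq_card, List.toFinset_eq_of_perm _ _ hperm]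
  rw [sorted_last_eq v hv, sorted_head_eq v hv, hset, hperm.length_eq,
      ofList_length_eq_length_iff, sfRun_iff_span v hv]
  tauto

-- ===== VERDICT (by name: the statement is the Claim_ definition above) =====
theorem holds_straight_flush_spec : Claim_equal_holds_straight_flush := by
  intro ranks suits hand _
  unfold Spec_holds_straight_flush holds_straight_flush holds_straight_flush_alt
  cases suits with
  | nil => simp [PySem.Set.ofList]
  | cons s0 rest =>
    by_cases hall : ∀ s ∈ rest, s = s0
    · have hone : ¬ (PySem.Set.ofList (s0 :: rest)).length ≠ 1 := by
        simp [suits_one_iff s0 rest |>.2 hall]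
      have hany : rest.any (fun s => decide (s ≠ s0)) = false := by
        simp [List.any_eq_false]; exact hall
      simp only [if_neg hone, hany, Bool.false_eq_true, if_false]
      set w := ranks.filter (fun r => decide (r ≠ 2)) with hw
      by_cases hwe : w = []
      · simp [hwe, PySem.List.sorted_eq_nil_iff]
      · have hsne : PySem.List.sorted w (fun x => x) false ≠ [] := by
          simp [PySem.List.sorted_eq_nil_iff, hwe]
        simp only [if_neg hsne, if_neg hwe]
        have hmne : (PySem.List.sorted w (fun x => x) false).map
            (fun r => if r = 14 then (1:Int) else r) ≠ [] := by
          simp [hsne]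
        have hAhi := A_cond_iff w hwe
        have hAlo := A_cond_iff ((PySem.List.sorted w (fun x => x) false).map
            (fun r => if r = 14 then (1:Int) else r)) hmne
        have hperm : ((PySem.List.sorted w (fun x => x) false).map
            (fun r => if r = 14 then (1:Int) else r)).Perm
            (w.map (fun r => if r = 14 then (1:Int) else r)) :=
          (PySem.List.sorted_perm w (fun x => x) false).map _
        have hloeq := sfRun_perm hperm
        by_cases h14 : (14:Int) ∈ PySem.List.sorted w (fun x => x) false
        · simp only [if_pos h14]
          by_cases okw : sfRun w = true <;>
          by_cases okf : sfRun (w.map (fun r => if r = 14 then (1:Int) else r)) = true <;>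
            · simp only [hAhi, hAlo, hloeq]
              simp [okw, okf]
        · simp only [if_neg h14]
          have h14w : (14:Int) ∉ w := fun hc => h14 ((PySem.List.mem_sorted _ _ _ _).2 hc)
          have hid : w.map (fun r => if r = 14 then (1:Int) else r) = w := by
            conv_rhs => rw [← List.map_id w]
            refine List.map_congr_left ?_
            intro a ha
            rcases eq_or_ne a 14 with rfl | hne
            · exact absurd ha h14w
            · simp [hne]
          by_cases okw : sfRun w = true <;>
            · simp only [hAhi, hid]
              simp [okw]
    · have hne1 : (PySem.Set.ofList (s0 :: rest)).length ≠ 1 := by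
        intro h; exact hall ((suits_one_iff s0 rest).1 h)
      have hany : rest.any (fun s => decide (s ≠ s0)) = true := by
        simp [List.any_eq_true]
        simp only [not_forall, exists_prop] at hall
        obtain ⟨s, hs, hss⟩ := hall
        exact ⟨s, hs, hss⟩
      simp only [if_pos hne1, hany]
      simp
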